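-- pv_equiv track=rewrite | github.com/ravisrhyme/CTCI | chapter9/9.10.py | find_tallest_stack
-- ===== SOURCE A (Python) =====
-- def find_tallest_stack(boxes, bottom):
-- 	""" Returns the tallest stack
-- 	"""
-- 	max_height = 0
-- 	max_stack = []
-- 	for box in boxes:
-- 		if (is_valid(box,bottom)):
-- 			current_stack = find_tallest_stack(boxes, box)
-- 			current_height = len(current_stack)
--
-- 			if current_height > max_height:
-- 				max_height = current_height
-- 				max_stack = current_stack
--
-- 	if len(bottom):
-- 		max_stack.append(bottom)
--
-- 	return max_stack
--
-- def is_valid(box,bottom):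
-- 	if len(bottom) == 0:
-- 		return True
--
-- 	elif box[0] > bottom[0] and \
-- 		 box[1] > bottom[1] and \
-- 		 box[2] > bottom[2]:
-- 		return True
--
-- 	else:
-- 		return False
-- ===== SOURCE B (Python) =====
-- # Bottom-up DP: process boxes in decreasing order of first dimension, so each box's
-- # tallest stack is computed exactly once and reused (memo keyed by box value),
-- # instead of A's exponential re-exploration.
--
-- def find_tallest_stack(boxes, bottom):
--     memo = {}
--     for box in sorted(boxes, key=lambda b: b[0], reverse=True):
--         memo[tuple(box)] = _tallest_on(boxes, box, memo) + [box]
--     top = _tallest_on(boxes, bottom, memo)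
--     return top + [bottom] if bottom else top
--
-- def _tallest_on(boxes, bottom, memo):
--     best = []
--     for box in boxes:
--         if not bottom or (box[0] > bottom[0] and box[1] > bottom[1] and box[2] > bottom[2]):
--             cur = memo[tuple(box)]
--             if len(cur) > len(best):
--                 best = cur
--     return best
-- ===== Notes on version B (the rewrite author's own statement) =====
-- stated objective: faster
-- what changed: Replaces A's exponential top-down re-exploration (find_tallest_stack recurses on the whole box list for every valid box, recomputing the same subproblems) by a bottom-up DP: boxes are processed in decreasing order of their first dimension and the tallest stack on each box is computed once into a memo keyed by the box value, then combined for the given bottom.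
-- outside the precondition, e.g. on find_tallest_stack([[1], [0]], [9, 9, 9]): A returns [[9, 9, 9]], B raises IndexError; on find_tallest_stack([[1]], [5, 5, 5]): A returns [[5, 5, 5]], B returns [[5, 5, 5]]
import Mathlib
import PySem

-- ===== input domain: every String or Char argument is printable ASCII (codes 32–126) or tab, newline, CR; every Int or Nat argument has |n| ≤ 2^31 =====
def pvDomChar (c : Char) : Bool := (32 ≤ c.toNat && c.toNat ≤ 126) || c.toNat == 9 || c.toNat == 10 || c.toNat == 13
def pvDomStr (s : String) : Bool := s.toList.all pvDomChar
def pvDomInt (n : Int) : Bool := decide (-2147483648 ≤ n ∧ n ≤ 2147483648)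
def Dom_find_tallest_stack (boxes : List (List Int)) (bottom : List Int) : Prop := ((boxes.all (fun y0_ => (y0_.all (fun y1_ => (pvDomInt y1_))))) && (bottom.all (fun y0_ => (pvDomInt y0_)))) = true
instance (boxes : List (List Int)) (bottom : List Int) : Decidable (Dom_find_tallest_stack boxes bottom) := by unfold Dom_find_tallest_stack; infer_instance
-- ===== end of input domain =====

-- B replaces A's exponential top-down recursion by a bottom-up DP over boxes in decreasing
-- first-dimension order with a memo keyed by box value (objective: faster, asymptotic).

-- ===== PORT A =====
-- is_valid(box, bottom): a `none` from pyGet? is an IndexError in Python; unreachable under Pre_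
def is_valid (box bottom : List Int) : Bool :=
  if bottom.length = 0 then true
  else
    match PySem.List.pyGet? box 0, PySem.List.pyGet? bottom 0,
          PySem.List.pyGet? box 1, PySem.List.pyGet? bottom 1,
          PySem.List.pyGet? box 2, PySem.List.pyGet? bottom 2 with
    | some b0, some c0, some b1, some c1, some b2, some c2 =>
        b0 > c0 && b1 > c1 && b2 > c2
    | _, _, _, _, _, _ => false

-- A's recursion, made total with a fuel counter (Python has no fuel; under Pre_ the
-- recursion depth is bounded by boxes.length + 1, so the fuel-0 branch is unreachable).
def fts_rec (boxes : List (List Int)) : Nat → List Int → List (List Int)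
  | 0, _ => []
  | fuel+1, bottom =>
    let st := boxes.foldl
      (fun (s : Nat × List (List Int)) box =>
        if is_valid box bottom then
          let current_stack := fts_rec boxes fuel box
          let current_height := current_stack.length
          if current_height > s.1 then (current_height, current_stack) else s
        else s)
      (0, [])
    if bottom.length ≠ 0 then st.2 ++ [bottom] else st.2

def find_tallest_stack (boxes : List (List Int)) (bottom : List Int) : List (List Int) :=
  fts_rec boxes (boxes.length + 2) bottom

-- ===== PORT B =====
-- `not bottom or (box[0] > bottom[0] and ...)` of Source B (a `none` = IndexError, unreachable under Pre_)
def fits (box bottom : List Int) : Bool :=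
  bottom.isEmpty ||
    (match PySem.List.pyGet? box 0, PySem.List.pyGet? bottom 0,
           PySem.List.pyGet? box 1, PySem.List.pyGet? bottom 1,
           PySem.List.pyGet? box 2, PySem.List.pyGet? bottom 2 with
     | some b0, some c0, some b1, some c1, some b2, some c2 =>
         b0 > c0 && b1 > c1 && b2 > c2
     | _, _, _, _, _, _ => false)

-- _tallest_on(boxes, bottom, memo); memo[tuple(box)] can only be consulted on keys present
-- under Pre_, so the KeyError branch is rendered by `.getD []`
def tallest_on (boxes : List (List Int)) (bottom : List Int)
    (memo : PySem.Dict (List Int) (List (List Int))) : List (List Int) :=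
  boxes.foldl
    (fun best box =>
      if fits box bottom then
        let cur := (memo.get? box).getD []
        if cur.length > best.length then cur else best
      else best)
    []

def find_tallest_stack_alt (boxes : List (List Int)) (bottom : List Int) : List (List Int) :=
  let memo := (PySem.List.sorted boxes (fun b => (PySem.List.pyGet? b 0).getD 0) true).foldl
    (fun memo box => memo.insert box (tallest_on boxes box memo ++ [box])) PySem.Dict.empty
  let top := tallest_on boxes bottom memo
  if !bottom.isEmpty then top ++ [bottom] else top

-- ===== PRECONDITION & SPEC =====
-- Pre_ restricts to the natural domain of (at least) 3-dimensional boxes: on shorter inner lists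
-- A raises IndexError or RecursionError except when a failed first comparison short-circuits,
-- and on some of those B's bottom-up precomputation raises where A happens to return.
def Pre_find_tallest_stack (boxes : List (List Int)) (bottom : List Int) : Prop :=
  (∀ b ∈ boxes, 3 ≤ b.length) ∧ (bottom = [] ∨ 3 ≤ bottom.length)
instance (boxes : List (List Int)) (bottom : List Int) : Decidable (Pre_find_tallest_stack boxes bottom) := by unfold Pre_find_tallest_stack; infer_instance

def pvWitness_find_tallest_stack : List (List Int) × List Int := ([[1, 2, 3], [2, 3, 4]], [])

def Spec_find_tallest_stack (boxes : List (List Int)) (bottom : List Int) (out : List (List Int)) : Prop := out = find_tallest_stack_alt boxes bottom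
instance (boxes : List (List Int)) (bottom : List Int) (out : List (List Int)) : Decidable (Spec_find_tallest_stack boxes bottom out) := by unfold Spec_find_tallest_stack; infer_instance

-- ===== CLAIM (what is proved, stated in full; the proofs are below) =====
def Claim_equal_find_tallest_stack : Prop := ∀ (boxes : List (List Int)) (bottom : List Int), Dom_find_tallest_stack boxes bottom → Pre_find_tallest_stack boxes bottom → Spec_find_tallest_stack boxes bottom (find_tallest_stack boxes bottom)

-- ===== LEMMAS AND PROOFS =====

-- the recursion measure: how many boxes can still sit above `bottom`
def fts_mu (boxes : List (List Int)) (bottom : List Int) : Nat :=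
  if bottom = [] then boxes.length + 1
  else (boxes.filter (fun b => decide (bottom.headI < b.headI))).length

lemma head_lt_of_is_valid {box bottom : List Int} (hb : 3 ≤ box.length)
    (hbot : bottom ≠ []) (h : is_valid box bottom = true) : bottom.headI < box.headI := by
  rcases box with _ | ⟨b0, box'⟩
  · simp at hb
  rcases bottom with _ | ⟨c0, bottom'⟩
  · exact absurd rfl hbot
  simp only [is_valid] at h
  rw [if_neg (by simp)] at h
  simp only [PySem.List.pyGet?_zero, List.getElem?_cons_zero] at h
  rcases h1 : PySem.List.pyGet? (b0 :: box') 1 with _ | u1 <;>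
    rcases h2 : PySem.List.pyGet? (c0 :: bottom') 1 with _ | v1 <;>
      rcases h3 : PySem.List.pyGet? (b0 :: box') 2 with _ | u2 <;>
        rcases h4 : PySem.List.pyGet? (c0 :: bottom') 2 with _ | v2 <;>
          rw [h1, h2, h3, h4] at h <;> simp_all [List.headI]

lemma filter_length_lt {α : Type} {l : List α} {p q : α → Bool}
    (hpq : ∀ x ∈ l, p x = true → q x = true) {x : α} (hx : x ∈ l)
    (hqx : q x = true) (hpx : p x = false) :
    (l.filter p).length < (l.filter q).length := by
  induction l with
  | nil => cases hx
  | cons a t ih =>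
    have hmono : ∀ (u : List α), (∀ y ∈ u, p y = true → q y = true) →
        (u.filter p).length ≤ (u.filter q).length := by
      intro u
      induction u with
      | nil => simp
      | cons b s ihs =>
        intro hu
        by_cases hpb : p b = true
        · simp [List.filter_cons, hpb, hu b (by simp) hpb]
          exact ihs (fun y hy => hu y (by simp [hy]))
        · simp only [List.filter_cons, Bool.not_eq_true] at hpb ⊢
          rw [hpb]
          have := ihs (fun y hy => hu y (by simp [hy]))
          cases hqb : q b <;> simp [this] <;> omega
    rcases List.mem_cons.mp hx with rfl | hxt
    · simp only [List.filter_cons, hpx, hqx]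
      have := hmono t (fun y hy => hpq y (by simp [hy]))
      simp
      omega
    · by_cases hpa : p a = true
      · simp [List.filter_cons, hpa, hpq a (by simp) hpa]
        exact ih (fun y hy => hpq y (by simp [hy])) hxt
      · simp only [List.filter_cons, Bool.not_eq_true] at hpa ⊢
        rw [hpa]
        have hlt := ih (fun y hy => hpq y (by simp [hy])) hxt
        cases hqa : q a <;> simp [hlt] <;> omega

lemma mu_lt {boxes : List (List Int)} {box bottom : List Int}
    (hlen : ∀ b ∈ boxes, 3 ≤ b.length) (hbx : box ∈ boxes)
    (hv : is_valid box bottom = true) :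
    fts_mu boxes box < fts_mu boxes bottom := by
  have hb3 : 3 ≤ box.length := hlen box hbx
  have hbne : box ≠ [] := by intro h; subst h; simp at hb3
  by_cases hbot : bottom = []
  · subst hbot
    simp only [fts_mu, hbne, if_neg, if_pos rfl]
    calc (boxes.filter _).length ≤ boxes.length := List.length_filter_le _ _
      _ < boxes.length + 1 := Nat.lt_succ_self _
  · have hhd : bottom.headI < box.headI := head_lt_of_is_valid hb3 hbot hv
    simp only [fts_mu, hbne, hbot, if_neg, if_false]
    exact filter_length_lt
      (fun y _ hy => by
        simp only [decide_eq_true_eq] at hy ⊢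
        exact lt_trans hhd hy)
      hbx (by simp [hhd]) (by simp)

lemma mu_le {boxes : List (List Int)} (bottom : List Int) :
    fts_mu boxes bottom ≤ boxes.length + 1 := by
  unfold fts_mu
  split
  · exact le_refl _
  · exact le_trans (List.length_filter_le _ _) (Nat.le_succ _)

-- the fuel is irrelevant once it exceeds the measure
lemma fts_rec_fuel (boxes : List (List Int)) (hlen : ∀ b ∈ boxes, 3 ≤ b.length) :
    ∀ (m : Nat) (bottom : List Int), fts_mu boxes bottom ≤ m →
    ∀ k1 k2, fts_mu boxes bottom < k1 → fts_mu boxes bottom < k2 →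
    fts_rec boxes k1 bottom = fts_rec boxes k2 bottom := by
  intro m
  induction m using Nat.strong_induction_on with
  | _ m ih =>
    intro bottom hm k1 k2 h1 h2
    obtain ⟨a, rfl⟩ : ∃ a, k1 = a + 1 := ⟨k1 - 1, by omega⟩
    obtain ⟨b, rfl⟩ : ∃ b, k2 = b + 1 := ⟨k2 - 1, by omega⟩
    simp only [fts_rec]
    have hfold : boxes.foldl
        (fun (s : Nat × List (List Int)) box =>
          if is_valid box bottom then
            let current_stack := fts_rec boxes a box
            let current_height := current_stack.length
            if current_height > s.1 then (current_height, current_stack) else s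
          else s) (0, [])
      = boxes.foldl
        (fun (s : Nat × List (List Int)) box =>
          if is_valid box bottom then
            let current_stack := fts_rec boxes b box
            let current_height := current_stack.length
            if current_height > s.1 then (current_height, current_stack) else s
          else s) (0, []) := by
      apply PySem.List.foldl_congr_mem
      intro acc box hbx
      by_cases hv : is_valid box bottom
      · have hmu := mu_lt hlen hbx hv
        have hrec : fts_rec boxes a box = fts_rec boxes b box := by
          apply ih (m - 1) (by omega) box (by omega) a b (by omega) (by omega)
        simp only [hv, if_true, hrec]
      · simp only [hv, if_false, Bool.false_eq_true]
    rw [hfold]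

-- the canonical value of A's recursion
def fts_canon (boxes : List (List Int)) (bottom : List Int) : List (List Int) :=
  fts_rec boxes (fts_mu boxes bottom + 1) bottom

lemma find_eq_canon {boxes : List (List Int)} {bottom : List Int}
    (hlen : ∀ b ∈ boxes, 3 ≤ b.length) :
    find_tallest_stack boxes bottom = fts_canon boxes bottom := by
  have hle := mu_le (boxes := boxes) bottom
  exact fts_rec_fuel boxes hlen (boxes.length + 1) bottom hle _ _ (by omega) (by omega)

-- a fold carrying (max_height, max_stack) with max_height = max_stack.length collapses
lemma pairfold (l : List (List Int)) (cond : List Int → Bool)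
    (g : List Int → List (List Int)) :
    ∀ (s : List (List Int)),
    l.foldl
      (fun (st : Nat × List (List Int)) box =>
        if cond box then
          let cs := g box
          if cs.length > st.1 then (cs.length, cs) else st
        else st)
      (s.length, s)
    = (let r := l.foldl
        (fun best box =>
          if cond box then
            let cs := g box
            if cs.length > best.length then cs else best
          else best) s;
       (r.length, r)) := by
  induction l with
  | nil => intro s; simp
  | cons a t ih =>
    intro s
    simp only [List.foldl_cons]
    by_cases hc : cond a
    · simp only [hc, if_true]
      by_cases hgt : (g a).length > s.length
      · simp only [hgt, if_pos]
        exact ih (g a)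
      · simp only [hgt, if_neg, if_false]
        exact ih s
    · simp only [hc, if_false, Bool.false_eq_true]
      exact ih s

-- one unfolding of the canonical recursion
lemma canon_unfold {boxes : List (List Int)} {bottom : List Int}
    (hlen : ∀ b ∈ boxes, 3 ≤ b.length) :
    fts_canon boxes bottom =
      (let best := boxes.foldl
        (fun best box =>
          if is_valid box bottom then
            let cs := fts_canon boxes box
            if cs.length > best.length then cs else best
          else best) [];
       if bottom.length ≠ 0 then best ++ [bottom] else best) := by
  conv_lhs => rw [fts_canon, fts_rec]
  have hfold : boxes.foldl
      (fun (s : Nat × List (List Int)) box =>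
        if is_valid box bottom then
          let current_stack := fts_rec boxes (fts_mu boxes bottom) box
          let current_height := current_stack.length
          if current_height > s.1 then (current_height, current_stack) else s
        else s) (0, [])
    = boxes.foldl
      (fun (s : Nat × List (List Int)) box =>
        if is_valid box bottom then
          let cs := fts_canon boxes box
          if cs.length > s.1 then (cs.length, cs) else s
        else s) (0, []) := by
    apply PySem.List.foldl_congr_mem
    intro acc box hbx
    by_cases hv : is_valid box bottom
    · have hmu := mu_lt hlen hbx hv
      have hrec : fts_rec boxes (fts_mu boxes bottom) box = fts_canon boxes box :=
        fts_rec_fuel boxes hlen (fts_mu boxes box) box (le_refl _) _ _ hmu (by omega)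
      simp only [hv, if_true, hrec, fts_canon]
    · simp only [hv, if_false, Bool.false_eq_true]
  rw [hfold]
  have hpair := pairfold boxes (fun box => is_valid box bottom) (fun box => fts_canon boxes box) []
  simp only [List.length_nil] at hpair
  rw [hpair]

lemma fits_eq_is_valid (box bottom : List Int) : fits box bottom = is_valid box bottom := by
  cases bottom <;> simp [fits, is_valid]

-- if the memo holds the canonical stack of every box valid atop `bottom`,
-- _tallest_on computes A's inner fold
lemma tallest_on_eq {boxes : List (List Int)} {bottom : List Int}
    {memo : PySem.Dict (List Int) (List (List Int))}
    (h : ∀ box ∈ boxes, is_valid box bottom = true →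
         memo.get? box = some (fts_canon boxes box)) :
    tallest_on boxes bottom memo =
      boxes.foldl
        (fun best box =>
          if is_valid box bottom then
            let cs := fts_canon boxes box
            if cs.length > best.length then cs else best
          else best) [] := by
  unfold tallest_on
  apply PySem.List.foldl_congr_mem
  intro acc box hbx
  rw [fits_eq_is_valid]
  by_cases hv : is_valid box bottom
  · simp only [hv, if_true, h box hbx hv, Option.getD_some]
  · simp only [hv, if_false, Bool.false_eq_true]

-- B's sort key and loop step, named for the proofs (definitionally the lambdas of the port)
def bKey (b : List Int) : Int := (PySem.List.pyGet? b 0).getD 0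

def bStep (boxes : List (List Int)) (memo : PySem.Dict (List Int) (List (List Int)))
    (box : List Int) : PySem.Dict (List Int) (List (List Int)) :=
  memo.insert box (tallest_on boxes box memo ++ [box])

lemma key_eq_headI (b : List Int) : bKey b = b.headI := by
  cases b <;> simp [bKey, PySem.List.pyGet?_zero, List.headI]

-- processing one box of the sorted list stores its canonical stack
lemma step_correct {boxes : List (List Int)} (hlen : ∀ b ∈ boxes, 3 ≤ b.length)
    {l1 l2 : List (List Int)} {box : List Int}
    {memo : PySem.Dict (List Int) (List (List Int))}
    (hsl : PySem.List.sorted boxes bKey true = l1 ++ box :: l2)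
    (H1 : ∀ b v, memo.get? b = some v → v = fts_canon boxes b)
    (H2 : ∀ b ∈ l1, (memo.get? b).isSome = true) :
    tallest_on boxes box memo ++ [box] = fts_canon boxes box := by
  have hperm := PySem.List.sorted_perm boxes bKey true
  rw [hsl] at hperm
  have hbox_mem : box ∈ boxes := hperm.subset (by simp)
  have hb3 : 3 ≤ box.length := hlen box hbox_mem
  have hbne : box ≠ [] := by intro hc; subst hc; simp at hb3
  have hpair : (l1 ++ box :: l2).Pairwise (fun a b => bKey b ≤ bKey a) := by
    have := PySem.List.sorted_pairwise_rev boxes bKey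
    rwa [hsl] at this
  have hmemo : ∀ b' ∈ boxes, is_valid b' box = true →
      memo.get? b' = some (fts_canon boxes b') := by
    intro b' hb' hv
    have hhd : box.headI < b'.headI := head_lt_of_is_valid (hlen b' hb') hbne hv
    have hmem' : b' ∈ l1 ++ box :: l2 := hperm.symm.subset hb'
    have hb'l1 : b' ∈ l1 := by
      rcases List.mem_append.mp hmem' with hl | hr
      · exact hl
      · exfalso
        have hle : bKey b' ≤ bKey box := by
          rcases List.mem_cons.mp hr with rfl | h2
          · exact le_refl _
          · have hp2 : (box :: l2).Pairwise (fun a b => bKey b ≤ bKey a) :=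
              List.Pairwise.sublist (List.sublist_append_right l1 (box :: l2)) hpair
            exact (List.pairwise_cons.mp hp2).1 b' h2
        rw [key_eq_headI, key_eq_headI] at hle
        omega
    obtain ⟨v, hv'⟩ := Option.isSome_iff_exists.mp (H2 b' hb'l1)
    rw [hv', H1 b' v hv']
  rw [tallest_on_eq hmemo]
  conv_rhs => rw [canon_unfold hlen (bottom := box)]
  have hne0 : box.length ≠ 0 := by simpa using hbne
  simp only [hne0, ne_eq, not_false_eq_true, if_true]

-- the invariant of B's build loop over the sorted box list
lemma memo_build {boxes : List (List Int)} (hlen : ∀ b ∈ boxes, 3 ≤ b.length) :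
    ∀ (l2 l1 : List (List Int)),
    PySem.List.sorted boxes bKey true = l1 ++ l2 →
    (∀ b v, (l1.foldl (bStep boxes) PySem.Dict.empty).get? b = some v → v = fts_canon boxes b) →
    (∀ b ∈ l1, ((l1.foldl (bStep boxes) PySem.Dict.empty).get? b).isSome = true) →
    (∀ b v, ((l1 ++ l2).foldl (bStep boxes) PySem.Dict.empty).get? b = some v →
        v = fts_canon boxes b) ∧
    (∀ b ∈ l1 ++ l2, (((l1 ++ l2).foldl (bStep boxes) PySem.Dict.empty).get? b).isSome = true) := by
  intro l2
  induction l2 with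
  | nil =>
    intro l1 hsl H1 H2
    constructor
    · simpa using H1
    · simpa using H2
  | cons box l2' ih =>
    intro l1 hsl H1 H2
    have hfold1 : (l1 ++ [box]).foldl (bStep boxes) PySem.Dict.empty
        = (l1.foldl (bStep boxes) PySem.Dict.empty).insert box (fts_canon boxes box) := by
      rw [List.foldl_append]
      simp only [List.foldl_cons, List.foldl_nil]
      exact congrArg (fun v => (List.foldl (bStep boxes) PySem.Dict.empty l1).insert box v)
        (step_correct hlen hsl H1 H2)
    have H1' : ∀ b v, ((l1 ++ [box]).foldl (bStep boxes) PySem.Dict.empty).get? b = some v →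
        v = fts_canon boxes b := by
      intro b v hv
      rw [hfold1, PySem.Dict.get?_insert] at hv
      by_cases hb : b = box
      · rw [if_pos hb] at hv
        subst hb
        exact (Option.some.inj hv).symm
      · rw [if_neg hb] at hv
        exact H1 b v hv
    have H2' : ∀ b ∈ l1 ++ [box],
        (((l1 ++ [box]).foldl (bStep boxes) PySem.Dict.empty).get? b).isSome = true := by
      intro b hb
      rw [hfold1, PySem.Dict.get?_insert]
      by_cases hbb : b = box
      · rw [if_pos hbb]; rfl
      · rw [if_neg hbb]
        apply H2
        rcases List.mem_append.mp hb with hl | hr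
        · exact hl
        · exact absurd (by simpa using hr) hbb
    have hsl' : PySem.List.sorted boxes bKey true = (l1 ++ [box]) ++ l2' := by
      rw [hsl, List.append_cons]
    have hmain := ih (l1 ++ [box]) hsl' H1' H2'
    rw [List.append_cons]
    exact hmain

-- the memo built by B's main loop holds the canonical stack of every box
lemma memo_complete {boxes : List (List Int)} (hlen : ∀ b ∈ boxes, 3 ≤ b.length) :
    ∀ b ∈ boxes,
      ((PySem.List.sorted boxes (fun b => (PySem.List.pyGet? b 0).getD 0) true).foldl
        (fun memo box => memo.insert box (tallest_on boxes box memo ++ [box]))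
        PySem.Dict.empty).get? b = some (fts_canon boxes b) := by
  intro b hb
  have hmain := memo_build hlen (PySem.List.sorted boxes bKey true) []
    (by simp)
    (by intro b v hv; rw [List.foldl_nil] at hv; simp [PySem.Dict.get?_empty] at hv)
    (by intro b hb; cases hb)
  rw [List.nil_append] at hmain
  have hbsl : b ∈ PySem.List.sorted boxes bKey true :=
    (PySem.List.sorted_perm boxes bKey true).symm.subset hb
  obtain ⟨v, hv⟩ := Option.isSome_iff_exists.mp (hmain.2 b hbsl)
  have hvc := hmain.1 b v hv
  subst hvc
  exact hv

-- ===== VERDICT (by name: the statement is the Claim_ definition above) =====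
theorem find_tallest_stack_spec : Claim_equal_find_tallest_stack := by
  intro boxes bottom _hdom hpre
  obtain ⟨hlen, hbot⟩ := hpre
  have hmemo : ∀ box ∈ boxes, is_valid box bottom = true →
      (((PySem.List.sorted boxes (fun b => (PySem.List.pyGet? b 0).getD 0) true).foldl
        (fun memo box => memo.insert box (tallest_on boxes box memo ++ [box]))
        PySem.Dict.empty)).get? box = some (fts_canon boxes box) :=
    fun box hbx _ => memo_complete hlen box hbx
  have htall := tallest_on_eq hmemo
  unfold Spec_find_tallest_stack
  rw [find_eq_canon hlen, canon_unfold hlen]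
  unfold find_tallest_stack_alt
  rw [← htall]
  cases bottom <;> simp
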